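-- pv_equiv track=rewrite | github.com/tomcotter7/aoc | aoc_python_day2/main.py | is_report_valid_on2
-- ===== SOURCE A (Python) =====
-- def is_report_valid_fast(report: list[int]) -> bool:
--     if len(report) < 2 or report[0] == report[1]:
--         return False
--
--     is_asc = report[0] < report[1]
--
--     return all(
--         abs(b - a) <= 3 and (b > a if is_asc else b < a)
--         for a, b in zip(report, report[1:])
--     )
--
-- def is_report_valid_on2(report: list[int]) -> bool:
--     if is_report_valid_fast(report):
--         return True
--
--     for i in range(len(report)):
--         nr = report[:i] + report[i + 1 :]
--         if is_report_valid_fast(nr):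
--             return True
--     return False
-- ===== SOURCE B (Python) =====
-- def _pair_ok(asc, a, b):
--     return abs(b - a) <= 3 and (a < b if asc else b < a)
--
-- def _first_bad(asc, xs):
--     # index of the first adjacent pair failing _pair_ok, or len(xs)-1 if none
--     for k in range(len(xs) - 1):
--         if not _pair_ok(asc, xs[k], xs[k + 1]):
--             return k
--     return len(xs) - 1
--
-- def _valid(r):
--     if len(r) < 2 or r[0] == r[1]:
--         return False
--     return _first_bad(r[0] < r[1], r) == len(r) - 1
--
-- def is_report_valid_on2(report):
--     n = len(report)
--     if _valid(report):
--         return True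
--     if n < 2:
--         return False
--     i = 0 if report[0] == report[1] else _first_bad(report[0] < report[1], report)
--     # removing any index other than 0, 1, i, i+1 leaves the first bad pair
--     # (and the direction-setting first two elements) intact, so only these
--     # four candidate removals need to be tested.
--     return any(_valid(report[:j] + report[j + 1:])
--                for j in (0, 1, i, i + 1) if j < n)
-- ===== Notes on version B (the rewrite author's own statement) =====
-- stated objective: faster
-- what changed: A rechecks the whole report after removing each of the n indices (O(n^2)); B locates the first violating adjacent pair in one scan and tests only the four candidate removals {0, 1, i, i+1} around it, since removing any other index leaves the direction-setting head pair and the violating pair adjacent and intact.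
import Mathlib
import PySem

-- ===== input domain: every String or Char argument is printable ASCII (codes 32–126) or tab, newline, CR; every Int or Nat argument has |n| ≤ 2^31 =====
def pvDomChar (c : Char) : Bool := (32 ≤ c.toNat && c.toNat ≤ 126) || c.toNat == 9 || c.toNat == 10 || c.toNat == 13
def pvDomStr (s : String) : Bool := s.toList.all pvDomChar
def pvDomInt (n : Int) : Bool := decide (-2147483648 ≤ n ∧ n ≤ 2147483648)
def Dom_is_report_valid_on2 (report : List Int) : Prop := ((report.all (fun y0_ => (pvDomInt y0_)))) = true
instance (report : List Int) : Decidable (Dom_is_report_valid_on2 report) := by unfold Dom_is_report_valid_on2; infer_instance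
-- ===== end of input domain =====

-- B replaces A's scan over all n one-element removals (each rechecked in O(n)) by testing only
-- the four candidate removals {0, 1, i, i+1} around the first violating adjacent pair i — O(n) total.

-- ===== PORT A =====
-- helper: is_report_valid_fast
def pvFastA (report : List Int) : Bool :=
  match report with
  | a :: b :: _ =>
    if a = b then false
    else (report.zip report.tail).all
      (fun p => decide (|p.2 - p.1| ≤ 3) && (if a < b then decide (p.1 < p.2) else decide (p.2 < p.1)))
  | _ => false

def is_report_valid_on2 (report : List Int) : Bool :=
  if pvFastA report then true
  else
    (PySem.List.pyRange 0 (report.length : Int) 1).any (fun i =>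
      pvFastA (PySem.List.slice report none (some i) ++ PySem.List.slice report (some (i + 1)) none))

-- ===== PORT B =====
-- helper: _pair_ok
def pvPairOk (asc : Bool) (a b : Int) : Bool :=
  decide (|b - a| ≤ 3) && (if asc then decide (a < b) else decide (b < a))

-- helper: _first_bad (index of first failing adjacent pair, else len-1)
def pvFirstBad (asc : Bool) : List Int → Int
  | x :: y :: t => if pvPairOk asc x y then pvFirstBad asc (y :: t) + 1 else 0
  | [_] => 0
  | [] => -1

-- helper: _valid
def pvValidB (r : List Int) : Bool :=
  match r with
  | a :: b :: _ =>
    if a = b then false else pvFirstBad (decide (a < b)) r == (r.length : Int) - 1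
  | _ => false

def is_report_valid_on2_alt (report : List Int) : Bool :=
  if pvValidB report then true
  else if report.length < 2 then false
  else
    let i : Int :=
      match report with
      | a :: b :: _ => if a = b then 0 else pvFirstBad (decide (a < b)) report
      | _ => 0
    (([0, 1, i, i + 1] : List Int).filter (fun j => decide (j < (report.length : Int)))).any
      (fun j => pvValidB (PySem.List.slice report none (some j) ++ PySem.List.slice report (some (j + 1)) none))

-- ===== PRECONDITION & SPEC =====
def Spec_is_report_valid_on2 (report : List Int) (out : Bool) : Prop := out = is_report_valid_on2_alt report
instance (report : List Int) (out : Bool) : Decidable (Spec_is_report_valid_on2 report out) := by unfold Spec_is_report_valid_on2; infer_instance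

-- ===== CLAIM (what is proved, stated in full; the proofs are below) =====
def Claim_equal_is_report_valid_on2 : Prop := ∀ (report : List Int), Dom_is_report_valid_on2 report → Spec_is_report_valid_on2 report (is_report_valid_on2 report)

-- ===== LEMMAS AND PROOFS =====

-- adjacent-pair chain predicate shared by both characterisations
def pvChain (asc : Bool) : List Int → Bool
  | x :: y :: t => pvPairOk asc x y && pvChain asc (y :: t)
  | _ => true

theorem pv_zip_all_eq_chain (asc : Bool) :
    ∀ l : List Int, ((l.zip l.tail).all (fun p => pvPairOk asc p.1 p.2)) = pvChain asc l
  | [] => rfl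
  | [_] => rfl
  | x :: y :: t => by
    simp only [List.tail_cons, List.zip_cons_cons, List.all_cons, pvChain]
    rw [show ((y :: t).zip t).all (fun p => pvPairOk asc p.1 p.2)
          = (((y :: t).zip (y :: t).tail).all (fun p => pvPairOk asc p.1 p.2)) from rfl,
        pv_zip_all_eq_chain asc (y :: t)]

theorem pv_firstBad_len (asc : Bool) :
    ∀ l : List Int, (pvFirstBad asc l == (l.length : Int) - 1) = pvChain asc l
  | [] => by simp [pvFirstBad, pvChain]
  | [x] => by simp [pvFirstBad, pvChain]
  | x :: y :: t => by
    rw [show pvChain asc (x :: y :: t) = (pvPairOk asc x y && pvChain asc (y :: t)) from rfl,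
        show pvFirstBad asc (x :: y :: t)
          = (if pvPairOk asc x y then pvFirstBad asc (y :: t) + 1 else 0) from rfl]
    by_cases h : pvPairOk asc x y = true
    · rw [if_pos h, h, Bool.true_and, ← pv_firstBad_len asc (y :: t)]
      apply Bool.coe_iff_coe.mp
      simp only [beq_iff_eq, List.length_cons]
      constructor <;> intro h' <;> push_cast at * <;> omega
    · rw [if_neg h, (Bool.not_eq_true _).mp h, Bool.false_and, beq_eq_false_iff_ne]
      simp only [List.length_cons]
      push_cast
      omega

theorem pvFastA_eq_validB (r : List Int) : pvFastA r = pvValidB r := by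
  match r with
  | [] => rfl
  | [x] => rfl
  | a :: b :: t =>
    simp only [pvFastA, pvValidB]
    by_cases hab : a = b
    · simp [hab]
    · rw [if_neg hab, if_neg hab]
      have hfun : (fun p : Int × Int => decide (|p.2 - p.1| ≤ 3)
                && (if a < b then decide (p.1 < p.2) else decide (p.2 < p.1)))
             = (fun p : Int × Int => pvPairOk (decide (a < b)) p.1 p.2) := by
        funext p; by_cases h : a < b <;> simp [pvPairOk, h]
      rw [hfun, pv_zip_all_eq_chain, ← pv_firstBad_len]

-- the slice pair in both ports is eraseIdx
theorem pv_slice_erase (r : List Int) (j : Int) (h : 0 ≤ j) :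
    PySem.List.slice r none (some j) ++ PySem.List.slice r (some (j + 1)) none
      = r.eraseIdx j.toNat := by
  rw [PySem.List.slice_to r h, PySem.List.slice_from r (by omega),
      List.eraseIdx_eq_take_drop_succ, show (j + 1).toNat = j.toNat + 1 from by omega]

-- index characterisation of pvChain
theorem pv_chain_iff_good (asc : Bool) :
    ∀ l : List Int, pvChain asc l = true ↔
      ∀ k, k + 1 < l.length → pvPairOk asc l[k]! l[k+1]! = true
  | [] => by simp [pvChain]
  | [x] => by simp [pvChain]
  | x :: y :: t => by
    rw [show pvChain asc (x :: y :: t) = (pvPairOk asc x y && pvChain asc (y :: t)) from rfl,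
        Bool.and_eq_true, pv_chain_iff_good asc (y :: t)]
    constructor
    · rintro ⟨h1, h2⟩ k hk
      cases k with
      | zero => simpa using h1
      | succ m => simpa using h2 m (by simp at hk ⊢; omega)
    · intro h
      refine ⟨by simpa using h 0 (by simp), fun m hm => ?_⟩
      simpa using h (m + 1) (by simp at hm ⊢; omega)

theorem pv_firstBad_bad (asc : Bool) :
    ∀ l : List Int, pvChain asc l = false →
      ∃ k : Nat, pvFirstBad asc l = (k : Int) ∧ k + 1 < l.length ∧
        pvPairOk asc l[k]! l[k+1]! = false
  | [] => by simp [pvChain]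
  | [x] => by simp [pvChain]
  | x :: y :: t => by
    intro hch
    rw [show pvChain asc (x :: y :: t) = (pvPairOk asc x y && pvChain asc (y :: t)) from rfl] at hch
    by_cases h : pvPairOk asc x y = true
    · rw [h, Bool.true_and] at hch
      obtain ⟨k, h1, h2, h3⟩ := pv_firstBad_bad asc (y :: t) hch
      refine ⟨k + 1, ?_, by simp at h2 ⊢; omega, by simpa using h3⟩
      rw [show pvFirstBad asc (x :: y :: t)
            = (if pvPairOk asc x y then pvFirstBad asc (y :: t) + 1 else 0) from rfl,
          if_pos h, h1]
      push_cast; ring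
    · refine ⟨0, ?_, by simp, by simpa using (Bool.not_eq_true _).mp h⟩
      rw [show pvFirstBad asc (x :: y :: t)
            = (if pvPairOk asc x y then pvFirstBad asc (y :: t) + 1 else 0) from rfl,
          if_neg h]
      rfl

theorem pv_validB_head (a b : Int) (l : List Int) (hab : a = b) :
    pvValidB (a :: b :: l) = false := by simp [pvValidB, hab]

theorem pv_erase_head_eq (a b : Int) (t : List Int) (j : Nat) (hj2 : 2 ≤ j) :
    (a :: b :: t).eraseIdx j = a :: b :: t.eraseIdx (j - 2) := by
  obtain ⟨m, rfl⟩ : ∃ m, j = m + 2 := ⟨j - 2, by omega⟩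
  simp [List.eraseIdx]

theorem pv_erase_getElem!_lt (l : List Int) (j m : Nat) (hm : m < j)
    (hml : m < (l.eraseIdx j).length) : (l.eraseIdx j)[m]! = l[m]! := by
  have h2 : m < l.length := by
    have := List.length_eraseIdx_le (l := l) (i := j); omega
  rw [getElem!_pos (l.eraseIdx j) m hml, getElem!_pos l m h2,
      List.getElem_eraseIdx_of_lt hml hm]

theorem pv_erase_getElem!_ge (l : List Int) (j m : Nat) (hm : j ≤ m)
    (hml : m < (l.eraseIdx j).length) : (l.eraseIdx j)[m]! = l[m+1]! := by
  have h2 : m + 1 < l.length := by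
    rw [List.length_eraseIdx] at hml
    split at hml <;> omega
  rw [getElem!_pos (l.eraseIdx j) m hml, getElem!_pos l (m+1) h2,
      List.getElem_eraseIdx_of_ge hml hm]

-- removing an index other than 0,1,k,k+1 keeps the bad pair (k,k+1) adjacent
-- and the direction-setting head pair intact
theorem pv_erase_still_bad (a b : Int) (t : List Int) (j k : Nat)
    (hj2 : 2 ≤ j) (hjlen : j < (a :: b :: t).length)
    (hk : k + 1 < (a :: b :: t).length)
    (hbad : pvPairOk (decide (a < b)) (a :: b :: t)[k]! (a :: b :: t)[k+1]! = false)
    (hjk : j ≠ k) (hjk1 : j ≠ k + 1) :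
    pvValidB ((a :: b :: t).eraseIdx j) = false := by
  have hlen : ((a :: b :: t).eraseIdx j).length = (a :: b :: t).length - 1 := by
    rw [List.length_eraseIdx, if_pos hjlen]
  by_cases hab : a = b
  · rw [pv_erase_head_eq a b t j hj2]
    exact pv_validB_head a b _ hab
  · rw [pv_erase_head_eq a b t j hj2,
        show pvValidB (a :: b :: t.eraseIdx (j - 2))
          = (pvFirstBad (decide (a < b)) (a :: b :: t.eraseIdx (j - 2))
              == ((a :: b :: t.eraseIdx (j - 2)).length : Int) - 1) from by
          simp [pvValidB, hab],
        pv_firstBad_len, ← pv_erase_head_eq a b t j hj2,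
        ← Bool.not_eq_true]
    · intro hgood
      rw [pv_chain_iff_good] at hgood
      rcases Nat.lt_or_ge k j with hkj | hkj
      · have hkj1 : k + 1 < j := by omega
        have hb : k + 1 < ((a :: b :: t).eraseIdx j).length := by
          simp only [List.length_cons] at *; omega
        have hgk := hgood k hb
        rw [pv_erase_getElem!_lt _ _ _ (by omega) (by omega),
            pv_erase_getElem!_lt _ _ _ (by omega) hb] at hgk
        rw [hbad] at hgk
        exact Bool.false_ne_true hgk
      · have hjk' : j < k := by omega
        obtain ⟨k', rfl⟩ : ∃ k', k = k' + 1 := ⟨k - 1, by omega⟩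
        have hb : k' + 1 < ((a :: b :: t).eraseIdx j).length := by
          simp only [List.length_cons] at *; omega
        have hgk := hgood k' hb
        rw [pv_erase_getElem!_ge _ _ _ (by omega) (by omega),
            pv_erase_getElem!_ge _ _ _ (by omega) hb] at hgk
        rw [hbad] at hgk
        exact Bool.false_ne_true hgk

-- ===== VERDICT (by name: the statement is the Claim_ definition above) =====
theorem is_report_valid_on2_spec : Claim_equal_is_report_valid_on2 := by
  intro r _
  unfold Spec_is_report_valid_on2
  match r with
  | [] => rfl
  | [x] =>
    simp only [is_report_valid_on2, is_report_valid_on2_alt]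
    rw [show pvFastA [x] = false from rfl, show pvValidB [x] = false from rfl]
    simp only [Bool.false_eq_true, if_false]
    rw [if_pos (by simp : ([x] : List Int).length < 2),
        show (([x] : List Int).length : Int) = 1 from by simp,
        show PySem.List.pyRange 0 1 1 = [0] from by decide]
    simp only [List.any_cons, List.any_nil, Bool.or_false]
    rw [pv_slice_erase [x] 0 (le_refl 0)]
    rfl
  | a :: b :: t =>
    by_cases hV : pvValidB (a :: b :: t) = true
    · simp only [is_report_valid_on2, is_report_valid_on2_alt, pvFastA_eq_validB, hV, if_true]
    · have hVf : pvValidB (a :: b :: t) = false := by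
        cases h : pvValidB (a :: b :: t) with
        | false => rfl
        | true => exact absurd h hV
      apply Bool.coe_iff_coe.mp
      simp only [is_report_valid_on2, is_report_valid_on2_alt, pvFastA_eq_validB, hVf,
        Bool.false_eq_true, if_false]
      rw [if_neg (by simp : ¬ (a :: b :: t).length < 2)]
      by_cases hab : a = b
      · rw [if_pos hab, List.any_eq_true, List.any_filter, List.any_eq_true]
        constructor
        · rintro ⟨x, hmem, hx⟩
          rw [PySem.List.mem_pyRange_one] at hmem
          obtain ⟨hx0, hxn⟩ := hmem
          rw [pv_slice_erase _ _ hx0] at hx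
          have hx2 : x < 2 := by
            by_contra hge
            push Not at hge
            rw [pv_erase_head_eq a b t x.toNat (by omega), pv_validB_head a b _ hab] at hx
            exact Bool.false_ne_true hx
          have hx01 : x = 0 ∨ x = 1 := by omega
          refine ⟨x, by rcases hx01 with rfl | rfl <;> simp, ?_⟩
          rw [Bool.and_eq_true, decide_eq_true_eq]
          exact ⟨hxn, by rw [pv_slice_erase _ _ hx0]; exact hx⟩
        · rintro ⟨j, hjmem, hj⟩
          rw [Bool.and_eq_true, decide_eq_true_eq] at hj
          obtain ⟨hjn, hjf⟩ := hj
          simp only [List.mem_cons, List.not_mem_nil, or_false] at hjmem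
          have hj0 : 0 ≤ j := by omega
          exact ⟨j, by rw [PySem.List.mem_pyRange_one]; exact ⟨hj0, hjn⟩, hjf⟩
      · rw [if_neg hab]
        have hch : pvChain (decide (a < b)) (a :: b :: t) = false := by
          rw [← pv_firstBad_len]
          rw [show pvValidB (a :: b :: t)
                = (pvFirstBad (decide (a < b)) (a :: b :: t)
                    == ((a :: b :: t).length : Int) - 1) from by simp [pvValidB, hab]] at hVf
          exact hVf
        obtain ⟨k, hk1, hk2, hk3⟩ := pv_firstBad_bad _ _ hch
        rw [hk1, List.any_eq_true, List.any_filter, List.any_eq_true]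
        constructor
        · rintro ⟨x, hmem, hx⟩
          rw [PySem.List.mem_pyRange_one] at hmem
          obtain ⟨hx0, hxn⟩ := hmem
          rw [pv_slice_erase _ _ hx0] at hx
          by_cases hjc : x = 0 ∨ x = 1 ∨ x = (k : Int) ∨ x = (k : Int) + 1
          · refine ⟨x, by simp only [List.mem_cons, List.not_mem_nil, or_false]; tauto, ?_⟩
            rw [Bool.and_eq_true, decide_eq_true_eq]
            exact ⟨hxn, by rw [pv_slice_erase _ _ hx0]; exact hx⟩
          · exfalso
            push Not at hjc
            obtain ⟨hc0, hc1, hck, hck1⟩ := hjc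
            rw [pv_erase_still_bad a b t x.toNat k (by omega)
                  (by simp only [List.length_cons] at hxn ⊢; omega) hk2 hk3
                  (by omega) (by omega)] at hx
            exact Bool.false_ne_true hx
        · rintro ⟨j, hjmem, hj⟩
          rw [Bool.and_eq_true, decide_eq_true_eq] at hj
          obtain ⟨hjn, hjf⟩ := hj
          simp only [List.mem_cons, List.not_mem_nil, or_false] at hjmem
          have hj0 : 0 ≤ j := by omega
          exact ⟨j, by rw [PySem.List.mem_pyRange_one]; exact ⟨hj0, hjn⟩, hjf⟩
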